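-- pv_equiv track=rewrite | github.com/HomoDevus/tinkoff-exams | tinkoff-algorithms/enterence-exams/4.archive.py | get_dividers_amount
-- ===== SOURCE A (Python) =====
-- def get_dividers_amount(number):
--     max_counted = 0
--     max_divider = 0
--
--     for x in range(1, number + 1):
--         counter = 0
--         divider = 0
--
--         for tmp in range(1, x + 1):
--             result = x / tmp
--
--             if result == int(result):
--                 counter += 1
--                 divider = tmp
--
--         if counter > max_counted:
--             max_counted = counter
--             max_divider = divider
--
--     return [max_divider, max_counted]
-- ===== SOURCE B (Python) =====
-- def get_dividers_amount(number):
--     # divisor-count sieve: counts[m] = number of divisors of m, built in O(n log n)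
--     counts = {}
--     for d in range(1, number + 1):
--         for m in range(d, number + 1, d):
--             counts[m] = counts.get(m, 0) + 1
--     best_count = 0
--     best_x = 0
--     for x in range(1, number + 1):
--         c = counts.get(x, 0)
--         if c > best_count:
--             best_count = c
--             best_x = x
--     return [best_x, best_count]
-- ===== Notes on version B (the rewrite author's own statement) =====
-- stated objective: faster
-- what changed: Replaces the per-x inner scan over all candidates (O(n^2) float divisions) with a divisor-count sieve that builds a dict of divisor counts by iterating multiples of each d, then a single argmax scan.
import Mathlib
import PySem

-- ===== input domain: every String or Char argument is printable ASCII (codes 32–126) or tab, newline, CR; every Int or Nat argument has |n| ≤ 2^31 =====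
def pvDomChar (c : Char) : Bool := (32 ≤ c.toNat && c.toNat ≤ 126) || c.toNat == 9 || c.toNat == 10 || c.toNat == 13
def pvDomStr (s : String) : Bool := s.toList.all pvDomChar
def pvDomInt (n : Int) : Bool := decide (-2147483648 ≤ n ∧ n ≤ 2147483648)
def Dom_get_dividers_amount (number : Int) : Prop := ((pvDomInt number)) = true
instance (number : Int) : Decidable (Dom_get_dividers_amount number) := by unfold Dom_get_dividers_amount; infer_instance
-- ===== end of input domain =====

-- B replaces A's quadratic per-x divisor scan with a divisor-count sieve (dict of counts
-- over multiples) followed by one argmax scan; same return value on the whole domain.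

-- ===== PORT A =====
def get_dividers_amount (number : Int) : List Int :=
  -- state (max_counted, max_divider)
  let st := (PySem.List.pyRange 1 (number + 1) 1).foldl
    (fun (acc : Int × Int) x =>
      -- inner state (counter, divider)
      let inner := (PySem.List.pyRange 1 (x + 1) 1).foldl
        (fun (st : Int × Int) tmp =>
          -- 'result = x / tmp; result == int(result)': ported as tmp divides x, which is
          -- exact here since 0 < tmp ≤ x ≤ 2^31 < 2^53, so the float test equals divisibility
          if PySem.Int.mod x tmp == 0 then (st.1 + 1, tmp) else st)
        (0, 0)
      if inner.1 > acc.1 then (inner.1, inner.2) else acc)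
    (0, 0)
  [st.2, st.1]

-- ===== PORT B =====
def get_dividers_amount_alt (number : Int) : List Int :=
  let counts := (PySem.List.pyRange 1 (number + 1) 1).foldl
    (fun (cs : PySem.Dict Int Int) d =>
      (PySem.List.pyRange d (number + 1) d).foldl
        (fun (cs : PySem.Dict Int Int) m => cs.modify m 0 (fun v => v + 1)) cs)
    PySem.Dict.empty
  -- state (best_count, best_x)
  let st := (PySem.List.pyRange 1 (number + 1) 1).foldl
    (fun (acc : Int × Int) x =>
      let c := counts.getD x 0
      if c > acc.1 then (c, x) else acc)
    (0, 0)
  [st.2, st.1]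

-- ===== PRECONDITION & SPEC =====
def Spec_get_dividers_amount (number : Int) (out : List Int) : Prop := out = get_dividers_amount_alt number
instance (number : Int) (out : List Int) : Decidable (Spec_get_dividers_amount number out) := by unfold Spec_get_dividers_amount; infer_instance

-- ===== CLAIM (what is proved, stated in full; the proofs are below) =====
def Claim_equal_get_dividers_amount : Prop := ∀ (number : Int), Dom_get_dividers_amount number → Spec_get_dividers_amount number (get_dividers_amount number)

-- ===== LEMMAS AND PROOFS =====

-- number of divisors of x among 1..x (as A's inner loop counts them)
def pvDivCnt (x : Int) : Int :=
  ((PySem.List.pyRange 1 (x + 1) 1).countP (fun t => PySem.Int.mod x t == 0) : Int)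

-- first component of A's inner fold counts the divisors seen
theorem pvInnerFst (x : Int) (l : List Int) (c dv : Int) :
    (l.foldl (fun (st : Int × Int) tmp =>
        if PySem.Int.mod x tmp == 0 then (st.1 + 1, tmp) else st) (c, dv)).1
      = c + (l.countP (fun t => PySem.Int.mod x t == 0) : Int) := by
  induction l generalizing c dv with
  | nil => simp
  | cons h t ih =>
    simp only [List.foldl_cons, List.countP_cons]
    by_cases hd : (PySem.Int.mod x h == 0) = true
    · rw [if_pos hd, ih, hd]
      simp only [if_true]
      push_cast
      ring
    · rw [if_neg hd, ih]
      simp only [hd]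
      push_cast
      ring

-- A's inner loop returns (divisor count of x, x) for x ≥ 1
theorem pvInnerA (x : Int) (hx : 1 ≤ x) :
    ((PySem.List.pyRange 1 (x + 1) 1).foldl
      (fun (st : Int × Int) tmp =>
        if PySem.Int.mod x tmp == 0 then (st.1 + 1, tmp) else st) (0, 0))
      = (pvDivCnt x, x) := by
  rw [PySem.List.pyRange_one_succ_right hx, List.foldl_append]
  have hxx : (PySem.Int.mod x x == 0) = true := by
    simp [PySem.Int.mod_eq_zero_iff_dvd]
  have h1 := pvInnerFst x (PySem.List.pyRange 1 x 1) 0 0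
  unfold pvDivCnt
  rw [PySem.List.pyRange_one_succ_right hx, List.countP_append]
  simp only [List.foldl_cons, List.foldl_nil]
  rw [if_pos hxx, h1]
  simp [hxx]

-- the sieve's dict: counts value at x
theorem pvSieveFold (n x : Int) (L : List Int) (d0 : PySem.Dict Int Int) :
    ((L.foldl (fun (cs : PySem.Dict Int Int) d =>
        (PySem.List.pyRange d (n + 1) d).foldl
          (fun (cs : PySem.Dict Int Int) m => cs.modify m 0 (fun v => v + 1)) cs) d0).getD x 0)
      = d0.getD x 0 + (L.map (fun d => ((PySem.List.pyRange d (n + 1) d).count x : Int))).sum := by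
  induction L generalizing d0 with
  | nil => simp
  | cons h t ih =>
    simp [List.foldl_cons, ih, PySem.Dict.getD_foldl_modify_add_one]
    ring

theorem pvRangeNodup (a b s : Int) (hs : 0 < s) : (PySem.List.pyRange a b s).Nodup := by
  rw [PySem.List.pyRange_of_pos a b hs]
  exact (List.nodup_range).map (fun k1 k2 h => by
    have : s * (k1 : Int) = s * (k2 : Int) := by omega
    have := mul_left_cancel₀ (by omega : s ≠ 0) this
    exact_mod_cast this)

-- count of x in the multiples-of-d range
theorem pvRangeCount (n d x : Int) (hd : 1 ≤ d) (_hx : 1 ≤ x) (hxn : x ≤ n) :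
    ((PySem.List.pyRange d (n + 1) d).count x : Int)
      = if d ∣ x ∧ d ≤ x then 1 else 0 := by
  have hmem : x ∈ PySem.List.pyRange d (n + 1) d ↔ d ∣ x ∧ d ≤ x := by
    rw [PySem.List.mem_pyRange_iff_of_pos (by omega)]
    constructor
    · rintro ⟨h1, h2, h3⟩
      refine ⟨?_, h1⟩
      simpa using dvd_add h3 (dvd_refl d)
    · rintro ⟨h1, h2⟩
      exact ⟨h2, by omega, dvd_sub h1 (dvd_refl d)⟩
  by_cases h : d ∣ x ∧ d ≤ x
  · rw [if_pos h]
    exact_mod_cast List.count_eq_one_of_mem (pvRangeNodup d (n+1) d (by omega)) (hmem.mpr h)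
  · rw [if_neg h]
    have hnm : x ∉ PySem.List.pyRange d (n + 1) d := fun hm => h (hmem.mp hm)
    exact_mod_cast List.count_eq_zero.mpr hnm

-- the sieve value at x equals A's divisor count
theorem pvSieveVal (n x : Int) (hx : 1 ≤ x) (hxn : x ≤ n) :
    (((PySem.List.pyRange 1 (n + 1) 1).foldl (fun (cs : PySem.Dict Int Int) d =>
        (PySem.List.pyRange d (n + 1) d).foldl
          (fun (cs : PySem.Dict Int Int) m => cs.modify m 0 (fun v => v + 1)) cs)
        PySem.Dict.empty).getD x 0)
      = pvDivCnt x := by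
  rw [pvSieveFold]
  rw [PySem.List.pyRange_one_append 1 (x + 1) (n + 1) (by omega) (by omega)]
  rw [List.map_append, List.sum_append]
  have hA : ((PySem.List.pyRange 1 (x + 1) 1).map
      (fun d => ((PySem.List.pyRange d (n + 1) d).count x : Int)))
      = (PySem.List.pyRange 1 (x + 1) 1).map
        (fun d => if (PySem.Int.mod x d == 0) = true then 1 else 0) := by
    apply List.map_congr_left
    intro d hd
    rw [PySem.List.mem_pyRange_one] at hd
    rw [pvRangeCount n d x (by omega) hx hxn]
    by_cases hdvd : d ∣ x
    · rw [if_pos ⟨hdvd, by omega⟩, if_pos (by simp [PySem.Int.mod_eq_zero_iff_dvd, hdvd])]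
    · rw [if_neg (fun h => hdvd h.1), if_neg (by simp [PySem.Int.mod_eq_zero_iff_dvd, hdvd])]
  have hB : ((PySem.List.pyRange (x + 1) (n + 1) 1).map
      (fun d => ((PySem.List.pyRange d (n + 1) d).count x : Int)))
      = (PySem.List.pyRange (x + 1) (n + 1) 1).map (fun _ => (0 : Int)) := by
    apply List.map_congr_left
    intro d hd
    rw [PySem.List.mem_pyRange_one] at hd
    rw [pvRangeCount n d x (by omega) hx hxn]
    exact if_neg (fun h => by omega)
  rw [hA, hB, PySem.List.sum_map_ite_one_zero]
  unfold pvDivCnt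
  simp

-- ===== VERDICT (by name: the statement is the Claim_ definition above) =====
theorem get_dividers_amount_spec : Claim_equal_get_dividers_amount := by
  intro n _
  unfold Spec_get_dividers_amount
  show get_dividers_amount n = get_dividers_amount_alt n
  unfold get_dividers_amount get_dividers_amount_alt
  have hfold : (PySem.List.pyRange 1 (n + 1) 1).foldl
      (fun (acc : Int × Int) x =>
        let inner := (PySem.List.pyRange 1 (x + 1) 1).foldl
          (fun (st : Int × Int) tmp =>
            if PySem.Int.mod x tmp == 0 then (st.1 + 1, tmp) else st)
          (0, 0)
        if inner.1 > acc.1 then (inner.1, inner.2) else acc)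
      (0, 0)
    = (PySem.List.pyRange 1 (n + 1) 1).foldl
      (fun (acc : Int × Int) x =>
        let c := (((PySem.List.pyRange 1 (n + 1) 1).foldl
          (fun (cs : PySem.Dict Int Int) d =>
            (PySem.List.pyRange d (n + 1) d).foldl
              (fun (cs : PySem.Dict Int Int) m => cs.modify m 0 (fun v => v + 1)) cs)
          PySem.Dict.empty).getD x 0)
        if c > acc.1 then (c, x) else acc)
      (0, 0) := by
    apply PySem.List.foldl_congr_mem
    intro acc x hx
    rw [PySem.List.mem_pyRange_one] at hx
    dsimp only
    rw [pvInnerA x hx.1, pvSieveVal n x hx.1 (by omega)]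
  dsimp only
  rw [hfold]
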